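-- pv_equiv track=rewrite | github.com/my970524/algorithm_study | 프로그래머스/lv1/12915. 문자열 내 마음대로 정렬하기/문자열 내 마음대로 정렬하기.py | solution
-- ===== SOURCE A (Python) =====
-- def solution(strings, n):
--     answer = []
--     order_dic = {}
--     strings = sorted(strings)
--
--     for string in strings:
--         order_dic[string] = string[n]
--     ordered_strings = sorted(order_dic.items(), key=lambda item: item[1])
--
--     for string in ordered_strings:
--         answer.append(string[0])
--     return answer
-- ===== SOURCE B (Python) =====
-- def solution(strings, n):
--     return sorted(set(strings), key=lambda x: (x[n], x))
-- ===== Notes on version B (the rewrite author's own statement) =====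
-- stated objective: simpler
-- what changed: Replaces A's dict-based two-stage pipeline (pre-sort, dict insertion for dedup, second stable sort of dict items by nth char) with a single sort of the deduplicated set under the composite key (x[n], x).
import Mathlib
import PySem

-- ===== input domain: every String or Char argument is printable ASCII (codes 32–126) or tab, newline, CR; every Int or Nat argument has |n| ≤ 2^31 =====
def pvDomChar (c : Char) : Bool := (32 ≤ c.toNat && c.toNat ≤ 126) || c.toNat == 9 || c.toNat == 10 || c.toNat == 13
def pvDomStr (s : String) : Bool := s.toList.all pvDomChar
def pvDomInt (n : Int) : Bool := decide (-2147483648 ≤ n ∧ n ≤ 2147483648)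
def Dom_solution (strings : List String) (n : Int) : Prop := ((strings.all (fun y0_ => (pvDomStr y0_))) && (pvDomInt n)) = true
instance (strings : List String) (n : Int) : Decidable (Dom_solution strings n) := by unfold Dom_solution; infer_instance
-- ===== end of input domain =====

-- B replaces A's two-stage dict pipeline with a single composite-key sort of the deduplicated set (simpler decomposition).

-- ===== PORT A =====
-- string[n] is ported with PySem.Str.pyGet?; the ' ' default is only reached outside Pre_solution (where Python raises IndexError).
def solution (strings : List String) (n : Int) : List String :=
  let strings2 := PySem.List.sorted strings (fun x => x) false
  let order_dic := strings2.foldl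
    (fun d s => d.insert s ((PySem.Str.pyGet? s n).getD ' ')) PySem.Dict.empty
  let ordered_strings := PySem.List.sorted order_dic.items (fun item => item.2) false
  ordered_strings.foldl (fun answer p => answer ++ [p.1]) []

-- ===== PORT B =====
-- sorted(set(strings), key=lambda x: (x[n], x)) — tuple key, so PySem.List.sorted2
def solution_alt (strings : List String) (n : Int) : List String :=
  PySem.List.sorted2 (PySem.Set.ofList strings)
    (fun x => (PySem.Str.pyGet? x n).getD ' ') (fun x => x) false

-- ===== PRECONDITION & SPEC =====
-- Pre_: Python A raises IndexError on string[n] when some string is too short for index n (negative indices wrap).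
def Pre_solution (strings : List String) (n : Int) : Prop :=
  ∀ s ∈ strings, (PySem.Str.pyGet? s n).isSome = true
instance (strings : List String) (n : Int) : Decidable (Pre_solution strings n) := by
  unfold Pre_solution; infer_instance
def pvWitness_solution : List String × Int := (["ba", "ab", "ba"], 1)
def Spec_solution (strings : List String) (n : Int) (out : List String) : Prop := out = solution_alt strings n
instance (strings : List String) (n : Int) (out : List String) : Decidable (Spec_solution strings n out) := by unfold Spec_solution; infer_instance

-- ===== CLAIM (what is proved, stated in full; the proofs are below) =====
def Claim_equal_solution : Prop := ∀ (strings : List String) (n : Int), Dom_solution strings n → Pre_solution strings n → Spec_solution strings n (solution strings n)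

-- ===== LEMMAS AND PROOFS =====

-- the strict lexicographic order (primary key, then secondary) both outputs are sorted in
def pvR {α κ σ : Type} [LT κ] [LT σ] (key : α → κ) (sec : α → σ) (a b : α) : Prop :=
  key a < key b ∨ (key a = key b ∧ sec a < sec b)

theorem pvR_asymm {α κ σ : Type} [LinearOrder κ] [LinearOrder σ] (key : α → κ) (sec : α → σ)
    {a b : α} (h1 : pvR key sec a b) (h2 : pvR key sec b a) : False := by
  rcases h1 with h1 | ⟨e1, h1⟩ <;> rcases h2 with h2 | ⟨e2, h2⟩
  · exact absurd h2 (lt_asymm h1)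
  · exact absurd h1 (e2 ▸ lt_irrefl _)
  · exact absurd h2 (e1 ▸ lt_irrefl _)
  · exact absurd h2 (lt_asymm h1)

theorem pvR_trans {α κ σ : Type} [LinearOrder κ] [LinearOrder σ] (key : α → κ) (sec : α → σ)
    {a b c : α} (h1 : pvR key sec a b) (h2 : pvR key sec b c) : pvR key sec a c := by
  rcases h1 with h1 | ⟨e1, h1⟩ <;> rcases h2 with h2 | ⟨e2, h2⟩
  · exact Or.inl (lt_trans h1 h2)
  · exact Or.inl (e2 ▸ h1)
  · exact Or.inl (e1 ▸ h2)
  · exact Or.inr ⟨e1.trans e2, lt_trans h1 h2⟩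

theorem pvR_ne {α κ σ : Type} [LinearOrder κ] [LinearOrder σ] (key : α → κ) (sec : α → σ)
    {a b : α} (h : pvR key sec a b) : a ≠ b := by
  rintro rfl
  rcases h with h | ⟨_, h⟩ <;> exact lt_irrefl _ h

-- trichotomy on elements with distinct secondary keys
theorem pvR_total {α κ σ : Type} [LinearOrder κ] [LinearOrder σ] (key : α → κ) (sec : α → σ)
    {a b : α} (hne : sec a ≠ sec b) (h : ¬ pvR key sec a b) : pvR key sec b a := by
  by_cases hk : key b < key a
  · exact Or.inl hk
  · have hk2 : ¬ key a < key b := fun hh => h (Or.inl hh)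
    have he : key a = key b := le_antisymm (not_lt.mp hk) (not_lt.mp hk2)
    have hs : ¬ sec a < sec b := fun hh => h (Or.inr ⟨he, hh⟩)
    exact Or.inr ⟨he.symm, lt_of_le_of_ne (not_lt.mp hs) (Ne.symm hne)⟩

-- sorted2's boolean comparison decides pvR
theorem sorted2_before_eq {α κ σ : Type} [LinearOrder κ] [LinearOrder σ]
    (key : α → κ) (sec : α → σ) (a b : α) :
    (decide (key a < key b) || (!decide (key b < key a) && decide (sec a < sec b))) = true ↔
      pvR key sec a b := by
  unfold pvR
  simp only [Bool.or_eq_true, Bool.and_eq_true, Bool.not_eq_true', decide_eq_true_eq,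
    decide_eq_false_iff_not, not_lt]
  constructor
  · rintro (h | ⟨hle, hs⟩)
    · exact Or.inl h
    · rcases lt_or_eq_of_le hle with h | h
      · exact Or.inl h
      · exact Or.inr ⟨h, hs⟩
  · rintro (h | ⟨he, hs⟩)
    · exact Or.inl h
    · exact Or.inr ⟨le_of_eq he, hs⟩

-- membership through the insertBy fold
theorem mem_foldl_insertBy {α : Type} (before : α → α → Bool) (l : List α) :
    ∀ (acc : List α) (z : α),
      z ∈ l.foldl (fun acc x => PySem.List.insertBy before x acc) acc ↔ z ∈ l ∨ z ∈ acc := by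
  induction l with
  | nil => simp
  | cons x t ih =>
    intro acc z
    simp only [List.foldl_cons, ih, PySem.List.mem_insertBy, List.mem_cons]
    tauto

-- inserting a fresh element into a pvR-sorted list keeps it pvR-sorted
theorem insertBy_pairwise_pvR {α κ σ : Type} [LinearOrder κ] [LinearOrder σ]
    (key : α → κ) (sec : α → σ) (x : α) (acc : List α)
    (hp : acc.Pairwise (pvR key sec)) (hfresh : ∀ y ∈ acc, sec x ≠ sec y) :
    (PySem.List.insertBy
        (fun a b => decide (key a < key b) || (!decide (key b < key a) && decide (sec a < sec b)))
        x acc).Pairwise (pvR key sec) := by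
  induction acc with
  | nil => simp [PySem.List.insertBy]
  | cons y ys ih =>
    rw [PySem.List.insertBy]
    split_ifs with h
    · rw [sorted2_before_eq] at h
      refine List.Pairwise.cons ?_ hp
      intro z hz
      rcases List.mem_cons.mp hz with rfl | hz
      · exact h
      · exact pvR_trans key sec h (List.rel_of_pairwise_cons hp hz)
    · rw [sorted2_before_eq] at h
      refine List.Pairwise.cons ?_
        (ih hp.of_cons (fun z hz => hfresh z (List.mem_cons_of_mem y hz)))
      intro z hz
      rcases (PySem.List.mem_insertBy _ _ _ _).mp hz with rfl | hz
      · exact pvR_total key sec (hfresh y List.mem_cons_self) h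
      · exact List.rel_of_pairwise_cons hp hz

-- the whole insertBy fold on elements with pairwise-distinct secondary keys is pvR-sorted
theorem foldl_insertBy_pairwise_pvR {α κ σ : Type} [LinearOrder κ] [LinearOrder σ]
    (key : α → κ) (sec : α → σ) (l : List α) (hl : l.Pairwise (fun a b => sec a ≠ sec b)) :
    ∀ acc : List α, acc.Pairwise (pvR key sec) →
      (∀ y ∈ acc, ∀ z ∈ l, sec z ≠ sec y) →
    (l.foldl (fun acc x =>
        PySem.List.insertBy
          (fun a b => decide (key a < key b) || (!decide (key b < key a) && decide (sec a < sec b)))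
          x acc) acc).Pairwise (pvR key sec) := by
  induction hl with
  | nil => exact fun acc hacc _ => hacc
  | @cons x t hrel htail ih =>
    intro acc hacc hcross
    simp only [List.foldl_cons]
    refine ih _
      (insertBy_pairwise_pvR key sec x acc hacc
        (fun y hy => hcross y hy x List.mem_cons_self)) ?_
    intro y hy z hz
    rcases (PySem.List.mem_insertBy _ _ _ _).mp hy with rfl | hy
    · exact (hrel z hz).symm
    · exact hcross y hy z (List.mem_cons_of_mem x hz)

-- ===== A-side lemmas =====

-- stability of PySem's insertion sort on an input strictly increasing in a secondary key
theorem insertBy_pairwise_stable {α κ σ : Type} [LinearOrder κ] [LinearOrder σ]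
    (key : α → κ) (sec : α → σ) (x : α) (acc : List α)
    (hp : acc.Pairwise (pvR key sec)) (hs : ∀ y ∈ acc, sec y < sec x) :
    (PySem.List.insertBy (fun a b => decide (key a < key b)) x acc).Pairwise (pvR key sec) := by
  induction acc with
  | nil => simp [PySem.List.insertBy]
  | cons y ys ih =>
    rw [PySem.List.insertBy]
    split_ifs with h
    · simp only [decide_eq_true_eq] at h
      refine List.Pairwise.cons ?_ hp
      intro z hz
      rcases List.mem_cons.mp hz with rfl | hz
      · exact Or.inl h
      · rcases List.rel_of_pairwise_cons hp hz with h' | ⟨e', _⟩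
        · exact Or.inl (lt_trans h h')
        · exact Or.inl (lt_of_lt_of_eq h e')
    · simp only [decide_eq_true_eq, not_lt] at h
      refine List.Pairwise.cons ?_ (ih hp.of_cons (fun z hz => hs z (List.mem_cons_of_mem y hz)))
      intro z hz
      rcases (PySem.List.mem_insertBy _ _ _ _).mp hz with rfl | hz
      · rcases lt_or_eq_of_le h with h' | h'
        · exact Or.inl h'
        · exact Or.inr ⟨h', hs y List.mem_cons_self⟩
      · exact List.rel_of_pairwise_cons hp hz

theorem foldl_insertBy_pairwise_stable {α κ σ : Type} [LinearOrder κ] [LinearOrder σ]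
    (key : α → κ) (sec : α → σ) (l : List α)
    (hl : l.Pairwise (fun a b => sec a < sec b)) :
    ∀ acc : List α, acc.Pairwise (pvR key sec) → (∀ y ∈ acc, ∀ x ∈ l, sec y < sec x) →
    (l.foldl (fun acc x => PySem.List.insertBy (fun a b => decide (key a < key b)) x acc) acc).Pairwise
      (pvR key sec) := by
  induction hl with
  | nil => exact fun acc hacc _ => hacc
  | @cons x t hrel htail ih =>
    intro acc hacc hcross
    simp only [List.foldl_cons]
    refine ih _
      (insertBy_pairwise_stable key sec x acc hacc (fun y hy => hcross y hy x List.mem_cons_self)) ?_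
    intro y hy z hz
    rcases (PySem.List.mem_insertBy _ _ _ _).mp hy with rfl | hy
    · exact hrel z hz
    · exact hcross y hy z (List.mem_cons_of_mem x hz)

theorem sorted_pairwise_stable {α κ σ : Type} [LinearOrder κ] [LinearOrder σ]
    (key : α → κ) (sec : α → σ) (l : List α)
    (hl : l.Pairwise (fun a b => sec a < sec b)) :
    (PySem.List.sorted l key false).Pairwise (pvR key sec) := by
  rw [PySem.List.sorted_eq_foldl_insertBy]
  exact foldl_insertBy_pairwise_stable key sec l hl [] List.Pairwise.nil (by simp)

-- set(xs) keeps first occurrences in order, hence is a sublist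
theorem ofList_sublist {α : Type} [BEq α] [LawfulBEq α] (xs : List α) :
    List.Sublist (PySem.Set.ofList xs) xs := by
  induction xs with
  | nil => simp [PySem.Set.ofList_nil]
  | cons x t ih =>
    rw [PySem.Set.ofList_cons]
    exact List.Sublist.cons₂ x (List.Sublist.trans List.filter_sublist ih)

-- set of a sorted list IS the sorted set
theorem ofList_sorted_eq_sorted_ofList (xs : List String) :
    PySem.Set.ofList (PySem.List.sorted xs (fun x => x) false) =
      PySem.List.sorted (PySem.Set.ofList xs) (fun x => x) false := by
  refine (PySem.List.sorted_eq_of_perm_of_pairwise_lt _ _ _ ?_ ?_).symm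
  · rw [List.perm_ext_iff_of_nodup (PySem.Set.nodup_ofList _) (PySem.Set.nodup_ofList _)]
    intro a
    simp [PySem.Set.mem_ofList, PySem.List.mem_sorted]
  · have h1 : (PySem.Set.ofList (PySem.List.sorted xs (fun x => x) false) : List String).Pairwise (· ≤ ·) :=
      (PySem.List.sorted_pairwise xs (fun x => x)).sublist (ofList_sublist _)
    have h2 := PySem.Set.nodup_ofList (PySem.List.sorted xs (fun x => x) false)
    exact (h1.and h2).imp (fun h => lt_of_le_of_ne h.1 h.2)

-- lookup in A's dict-building loop: the stored value is a function of the key alone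
theorem get?_foldl_insert_fun {κ ν : Type} [BEq κ] [LawfulBEq κ]
    (f : κ → ν) (l : List κ) (d : PySem.Dict κ ν) (k : κ) :
    (l.foldl (fun d s => d.insert s (f s)) d).get? k =
      if k ∈ l then some (f k) else d.get? k := by
  induction l generalizing d with
  | nil => simp
  | cons x t ih =>
    simp only [List.foldl_cons, ih, List.mem_cons]
    by_cases ht : k ∈ t
    · simp [ht]
    · by_cases hx : k = x
      · subst hx; simp [ht, PySem.Dict.get?_insert_self]
      · simp [ht, hx, PySem.Dict.get?_insert_of_ne _ _ hx]

-- A's dict items are exactly the deduped strings paired with their nth character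
theorem items_foldl_insert_fun {κ ν : Type} [BEq κ] [LawfulBEq κ] [Inhabited ν]
    (f : κ → ν) (l : List κ) :
    (l.foldl (fun d s => d.insert s (f s)) PySem.Dict.empty).items =
      (PySem.Set.ofList l : List κ).map (fun s => (s, f s)) := by
  have hnd : (l.foldl (fun d s => d.insert s (f s)) PySem.Dict.empty).keys.Nodup :=
    PySem.Dict.nodup_keys_foldl_insert l (fun _ s => f s) PySem.Dict.empty
      (by simp [PySem.Dict.keys_empty])
  have hkeys : (l.foldl (fun d s => d.insert s (f s)) PySem.Dict.empty).keys =
      (PySem.Set.ofList l : List κ) := by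
    rw [PySem.Dict.keys_foldl_insert, PySem.Dict.keys_empty, PySem.Set.update_nil_left]
  rw [PySem.Dict.items_eq_map_keys _ hnd default, hkeys]
  refine List.map_congr_left ?_
  intro k hk
  have hkl : k ∈ l := (PySem.Set.mem_ofList _ _).mp hk
  rw [PySem.Dict.getD_eq_get?_getD, get?_foldl_insert_fun, if_pos hkl]
  rfl

-- the heart: A's stable sort-by-key of the presorted deduped pairs equals B's composite-key sort
theorem map_fst_stable_sort_eq_sorted2 (f : String → Char) (xs : List String) :
    List.map (fun p => p.1)
      (PySem.List.sorted
        ((PySem.List.sorted (PySem.Set.ofList xs) (fun x => x) false).map (fun s => (s, f s)))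
        (fun it => it.2) false)
      = PySem.List.sorted2 (PySem.Set.ofList xs) f (fun x => x) false := by
  have hU : (PySem.List.sorted (PySem.Set.ofList xs) (fun x => x) false).Pairwise (· < ·) :=
    PySem.List.sorted_ofList_pairwise_lt xs
  -- A side: strictly sorted in pvR f id
  have hA_pw : (List.map (fun p => p.1)
      (PySem.List.sorted
        ((PySem.List.sorted (PySem.Set.ofList xs) (fun x => x) false).map (fun s => (s, f s)))
        (fun it => it.2) false)).Pairwise (pvR f (fun x => x)) := by
    have hpairs : ((PySem.List.sorted (PySem.Set.ofList xs) (fun x => x) false).map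
        (fun s => (s, f s))).Pairwise (fun p q : String × Char => p.1 < q.1) :=
      List.pairwise_map.mpr hU
    have hst := sorted_pairwise_stable (fun it : String × Char => it.2) (fun it => it.1)
      ((PySem.List.sorted (PySem.Set.ofList xs) (fun x => x) false).map (fun s => (s, f s))) hpairs
    rw [List.pairwise_map]
    refine hst.imp_of_mem ?_
    intro p q hpmem hqmem hpq
    have hp2 : p.2 = f p.1 := by
      rcases List.mem_map.mp ((PySem.List.mem_sorted _ _ _ _).mp hpmem) with ⟨s, _, rfl⟩; rfl
    have hq2 : q.2 = f q.1 := by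
      rcases List.mem_map.mp ((PySem.List.mem_sorted _ _ _ _).mp hqmem) with ⟨s, _, rfl⟩; rfl
    rcases hpq with h | ⟨e, h⟩
    · exact Or.inl (hp2 ▸ hq2 ▸ h)
    · exact Or.inr ⟨hp2 ▸ hq2 ▸ e, h⟩
  -- B side: strictly sorted in pvR f id
  have hB_pw : (PySem.List.sorted2 (PySem.Set.ofList xs) f (fun x => x) false).Pairwise
      (pvR f (fun x => x)) := by
    show (List.foldl _ [] _).Pairwise _
    exact foldl_insertBy_pairwise_pvR f (fun x => x) (PySem.Set.ofList xs)
      ((PySem.Set.nodup_ofList xs).imp (fun h => h)) [] List.Pairwise.nil (by simp)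
  -- same members
  have hperm : (List.map (fun p => p.1)
      (PySem.List.sorted
        ((PySem.List.sorted (PySem.Set.ofList xs) (fun x => x) false).map (fun s => (s, f s)))
        (fun it => it.2) false)).Perm
      (PySem.List.sorted2 (PySem.Set.ofList xs) f (fun x => x) false) := by
    rw [List.perm_ext_iff_of_nodup (hA_pw.imp (pvR_ne f (fun x => x)))
      (hB_pw.imp (pvR_ne f (fun x => x)))]
    intro a
    have hBmem : a ∈ PySem.List.sorted2 (PySem.Set.ofList xs) f (fun x => x) false ↔
        a ∈ (PySem.Set.ofList xs : List String) := by
      show a ∈ List.foldl _ [] _ ↔ _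
      rw [mem_foldl_insertBy]
      simp
    rw [hBmem]
    constructor
    · intro ha
      rcases List.mem_map.mp ha with ⟨p, hp, rfl⟩
      rcases List.mem_map.mp ((PySem.List.mem_sorted _ _ _ _).mp hp) with ⟨s, hs, rfl⟩
      exact (PySem.List.mem_sorted _ _ _ _).mp hs
    · intro ha
      exact List.mem_map.mpr ⟨(a, f a),
        (PySem.List.mem_sorted _ _ _ _).mpr
          (List.mem_map.mpr ⟨a, (PySem.List.mem_sorted _ _ _ _).mpr ha, rfl⟩), rfl⟩
  exact List.Perm.eq_of_pairwise
    (fun a b _ _ h1 h2 => (pvR_asymm f (fun x => x) h1 h2).elim) hA_pw hB_pw hperm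

-- ===== VERDICT (by name: the statement is the Claim_ definition above) =====
theorem solution_spec : Claim_equal_solution := by
  intro strings n _ _
  unfold Spec_solution
  simp only [solution, solution_alt]
  have hitems : ((PySem.List.sorted strings (fun x => x) false).foldl
      (fun d s => d.insert s ((PySem.Str.pyGet? s n).getD ' ')) PySem.Dict.empty).items =
      (PySem.List.sorted (PySem.Set.ofList strings) (fun x => x) false).map
        (fun s => (s, (PySem.Str.pyGet? s n).getD ' ')) := by
    have h := items_foldl_insert_fun (fun s => (PySem.Str.pyGet? s n).getD ' ')
      (PySem.List.sorted strings (fun x => x) false)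
    rwa [ofList_sorted_eq_sorted_ofList] at h
  simp only [hitems, PySem.List.foldl_append_singleton_eq_map]
  exact map_fst_stable_sort_eq_sorted2 (fun s => (PySem.Str.pyGet? s n).getD ' ') strings
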